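-- pv_equiv track=rewrite | github.com/cy-suite/paddlepaddle-new | python/paddle/distributed/auto_parallel/static/utils.py | compute_compatible_dims_mapping
-- ===== SOURCE A (Python) =====
-- def compute_compatible_dim_mapping(dim_mappings):
--     if not dim_mappings:
--         return None
--     compatible_mapping = dim_mappings[0]
--     for mapping in dim_mappings:
--         if compatible_mapping == -1:
--             compatible_mapping = mapping
--         elif mapping == -1:
--             continue
--         elif compatible_mapping == mapping:
--             continue
--         else:
--             return None
--     return compatible_mapping
--
-- def compute_compatible_dims_mapping(dims_mapping_list):
--     if not dims_mapping_list:
--         return None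
--     length = len(dims_mapping_list[0])
--     for dims_mapping in dims_mapping_list:
--         assert (
--             dims_mapping is not None
--         ), "Dims mapping must not be None for compatible computation"
--         assert (
--             len(dims_mapping) == length
--         ), "The length of dims_mapping in list must be same for compatible computation."
--     compatible_result = []
--     for dim_mappings in zip(*dims_mapping_list):
--         compatible_dim_mapping = compute_compatible_dim_mapping(
--             list(dim_mappings)
--         )
--         if compatible_dim_mapping is None:
--             return None
--         compatible_result.append(compatible_dim_mapping)
--     return compatible_result
-- ===== SOURCE B (Python) =====
-- def compute_compatible_dims_mapping(dims_mapping_list):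
--     if not dims_mapping_list:
--         return None
--     length = len(dims_mapping_list[0])
--     for dims_mapping in dims_mapping_list:
--         assert (
--             dims_mapping is not None
--         ), "Dims mapping must not be None for compatible computation"
--         assert (
--             len(dims_mapping) == length
--         ), "The length of dims_mapping in list must be same for compatible computation."
--     merged = [-1] * length
--     for row in dims_mapping_list:
--         nxt = []
--         for a, b in zip(merged, row):
--             if a == -1:
--                 nxt.append(b)
--             elif b == -1 or a == b:
--                 nxt.append(a)
--             else:
--                 return None
--         merged = nxt
--     return merged
-- ===== Notes on version B (the rewrite author's own statement) =====
-- stated objective: alternative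
-- what changed: Replaces A's column-major strategy (zip(*rows) plus a per-column accumulator helper) by a row-major pairwise reduction: a whole merged vector starting at [-1]*length is merged with each row elementwise, failing on the first conflicting row.
import Mathlib
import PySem

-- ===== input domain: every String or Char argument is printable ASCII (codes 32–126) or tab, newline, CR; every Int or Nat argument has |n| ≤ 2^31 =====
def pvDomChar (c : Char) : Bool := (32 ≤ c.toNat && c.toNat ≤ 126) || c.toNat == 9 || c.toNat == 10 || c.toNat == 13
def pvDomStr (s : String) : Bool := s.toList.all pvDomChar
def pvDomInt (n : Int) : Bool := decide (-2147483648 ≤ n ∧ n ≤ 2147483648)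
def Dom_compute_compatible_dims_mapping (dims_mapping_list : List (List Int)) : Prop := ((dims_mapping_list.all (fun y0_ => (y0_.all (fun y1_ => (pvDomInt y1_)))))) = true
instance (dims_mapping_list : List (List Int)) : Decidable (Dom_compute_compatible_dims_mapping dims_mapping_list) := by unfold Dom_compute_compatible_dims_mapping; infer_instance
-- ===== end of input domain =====

-- B replaces A's column-major strategy (zip(*rows) + per-column accumulator helper) by a
-- row-major pairwise reduction: a merged vector starting at [-1]*length is merged with each
-- row elementwise, failing on the first conflicting row; same cost, a different traversal.
-- Pre_ excludes inputs where the inner lists have different lengths, on which A raises AssertionError.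

-- ===== PORT A =====

-- zip(*dims_mapping_list): under Pre_ (all rows the same length) the columns are exactly
-- the i-th entries of every row, i < length of the first row; exact there (zip truncates only on unequal lengths).
def pvZipStar (lists : List (List Int)) : List (List Int) :=
  match lists with
  | [] => []
  | l0 :: _ => (List.range l0.length).map (fun i => lists.map (fun l => l.getD i 0))

-- the loop body of compute_compatible_dim_mapping
def pvStepA (acc : Option Int) (m : Int) : Option Int :=
  match acc with
  | none => none
  | some c => if c = -1 then some m else if m = -1 then some c else if c = m then some c else none

def compute_compatible_dim_mapping_port (dim_mappings : List Int) : Option Int :=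
  match dim_mappings with
  | [] => none
  | d :: _ => dim_mappings.foldl pvStepA (some d)

def compute_compatible_dims_mapping (dims_mapping_list : List (List Int)) : Option (List Int) :=
  match dims_mapping_list with
  | [] => none
  | _ =>
    -- the two asserts raise exactly outside Pre_; no value is produced there
    (pvZipStar dims_mapping_list).foldl
      (fun acc col =>
        match acc with
        | none => none
        | some r =>
          match compute_compatible_dim_mapping_port col with
          | none => none
          | some v => some (r ++ [v]))
      (some [])

-- ===== PORT B =====

-- B's inner loop: merge the running vector with one row elementwise (None = conflict)
def pvMerge2 : List Int → List Int → Option (List Int)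
  | a :: as_, b :: bs =>
    if a = -1 then (pvMerge2 as_ bs).map (fun r => b :: r)
    else if b = -1 ∨ a = b then (pvMerge2 as_ bs).map (fun r => a :: r)
    else none
  | _, _ => some []

def compute_compatible_dims_mapping_alt (dims_mapping_list : List (List Int)) : Option (List Int) :=
  match dims_mapping_list with
  | [] => none
  | l0 :: _ =>
    dims_mapping_list.foldl
      (fun acc row => acc.bind (fun m => pvMerge2 m row))
      (some (List.replicate l0.length (-1)))

-- ===== PRECONDITION & SPEC =====
-- Pre_ excludes exactly the inputs on which A's length assert raises (rows of unequal length).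
def Pre_compute_compatible_dims_mapping (dims_mapping_list : List (List Int)) : Prop :=
  ∀ l ∈ dims_mapping_list, l.length = (dims_mapping_list.headD []).length
instance (dims_mapping_list : List (List Int)) : Decidable (Pre_compute_compatible_dims_mapping dims_mapping_list) := by unfold Pre_compute_compatible_dims_mapping; infer_instance

def pvWitness_compute_compatible_dims_mapping : List (List Int) := [[-1, 2, 0], [3, -1, 0]]

def Spec_compute_compatible_dims_mapping (dims_mapping_list : List (List Int)) (out : Option (List Int)) : Prop := out = compute_compatible_dims_mapping_alt dims_mapping_list
instance (dims_mapping_list : List (List Int)) (out : Option (List Int)) : Decidable (Spec_compute_compatible_dims_mapping dims_mapping_list out) := by unfold Spec_compute_compatible_dims_mapping; infer_instance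

-- ===== CLAIM (what is proved, stated in full; the proofs are below) =====
def Claim_equal_compute_compatible_dims_mapping : Prop := ∀ (dims_mapping_list : List (List Int)), Dom_compute_compatible_dims_mapping dims_mapping_list → Pre_compute_compatible_dims_mapping dims_mapping_list → Spec_compute_compatible_dims_mapping dims_mapping_list (compute_compatible_dims_mapping dims_mapping_list)

-- ===== LEMMAS AND PROOFS =====

-- single-value merge (the common core of both per-element steps)
def pvStepM (c m : Int) : Option Int :=
  if c = -1 then some m else if m = -1 ∨ c = m then some c else none

lemma pvStepA_some (c m : Int) : pvStepA (some c) m = pvStepM c m := by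
  simp only [pvStepA, pvStepM]
  by_cases h1 : c = -1 <;> by_cases h2 : m = -1 <;> by_cases h3 : c = m <;>
    simp [h1, h2, h3]

lemma pvStepA_none (t : List Int) : t.foldl pvStepA none = none := by
  induction t with
  | nil => rfl
  | cons m t ih => simpa [pvStepA] using ih

-- sequencing a list of optional values
def pvSeq : List (Option Int) → Option (List Int)
  | [] => some []
  | none :: _ => none
  | some v :: os => (pvSeq os).map (fun r => v :: r)

lemma pvSeq_map_some (l : List Int) : pvSeq (l.map some) = some l := by
  induction l with
  | nil => rfl
  | cons v l ih => simp [pvSeq, ih]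

lemma pvSeq_none {os : List (Option Int)} (h : none ∈ os) : pvSeq os = none := by
  induction os with
  | nil => cases h
  | cons o os ih =>
    cases o with
    | none => rfl
    | some v =>
      rcases List.mem_cons.mp h with h' | h'
      · exact absurd h' (by simp)
      · simp [pvSeq, ih h']

lemma pvSeq_eq_some {os : List (Option Int)} {l : List Int} (h : pvSeq os = some l) :
    os = l.map some := by
  induction os generalizing l with
  | nil => cases h; rfl
  | cons o os ih =>
    cases o with
    | none => simp [pvSeq] at h
    | some v =>
      simp only [pvSeq, Option.map_eq_some_iff] at h
      obtain ⟨r, hr, rfl⟩ := h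
      simp [ih hr]

lemma pvSeq_eq_none {os : List (Option Int)} (h : pvSeq os = none) : (none : Option Int) ∈ os := by
  induction os with
  | nil => simp [pvSeq] at h
  | cons o os ih =>
    cases o with
    | none => simp
    | some v =>
      simp only [pvSeq] at h
      cases hs : pvSeq os with
      | none => exact List.mem_cons_of_mem _ (ih hs)
      | some l => rw [hs] at h; simp at h

-- pvMerge2 is the sequencing of the elementwise merges
lemma pvMerge2_eq_seq (m r : List Int) :
    pvMerge2 m r = pvSeq (List.zipWith pvStepM m r) := by
  induction m generalizing r with
  | nil => cases r <;> rfl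
  | cons a as_ ih =>
    cases r with
    | nil => rfl
    | cons b bs =>
      simp only [pvMerge2, List.zipWith_cons_cons, pvStepM]
      by_cases h1 : a = -1
      · simp [h1, pvSeq, ih]
      · by_cases h2 : b = -1 ∨ a = b
        · simp [h1, h2, pvSeq, ih]
        · simp [h1, h2, pvSeq]

-- A's outer fold = pvSeq of the per-column helper results
lemma pvBuild_eq (cols : List (List Int)) : ∀ (r : List Int),
    cols.foldl
      (fun acc col =>
        match acc with
        | none => none
        | some r =>
          match compute_compatible_dim_mapping_port col with
          | none => none
          | some v => some (r ++ [v]))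
      (some r)
    = (pvSeq (cols.map compute_compatible_dim_mapping_port)).map (fun vs => r ++ vs) := by
  induction cols with
  | nil => intro r; simp [pvSeq]
  | cons c cs ih =>
    intro r
    rw [List.foldl_cons, List.map_cons]
    match hv : compute_compatible_dim_mapping_port c with
    | none =>
      have hfold : ∀ (cs : List (List Int)), cs.foldl
          (fun acc col =>
            match acc with
            | none => none
            | some r =>
              match compute_compatible_dim_mapping_port col with
              | none => none
              | some v => some (r ++ [v]))
          none = none := by
        intro cs; induction cs with
        | nil => rfl
        | cons c' cs' ih' => rw [List.foldl_cons]; exact ih'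
      simp only [hfold, pvSeq]; rfl
    | some v =>
      simp only [ih (r ++ [v]), pvSeq]
      cases pvSeq (cs.map compute_compatible_dim_mapping_port) <;> simp

-- the per-column helper on a nonempty column is the fold of pvStepA from -1
lemma pvHelper_eq (d : Int) (t : List Int) :
    compute_compatible_dim_mapping_port (d :: t) = (d :: t).foldl pvStepA (some (-1)) := by
  have h : pvStepA (some (-1)) d = some d := by simp [pvStepA]
  have h' : pvStepA (some d) d = some d := by
    by_cases hd : d = -1 <;> simp [pvStepA, hd]
  simp [compute_compatible_dim_mapping_port, List.foldl_cons, h, h']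

-- the row-major fold equals the per-index column folds, sequenced
lemma pvRowFold (R : List (List Int)) : ∀ (m : List Int), (∀ r ∈ R, r.length = m.length) →
    R.foldl (fun acc row => acc.bind (fun mm => pvMerge2 mm row)) (some m)
    = pvSeq ((List.range m.length).map
        (fun i => (R.map (fun l => l.getD i 0)).foldl pvStepA (some (m.getD i 0)))) := by
  induction R with
  | nil =>
    intro m _
    have : (List.range m.length).map (fun i => some (m.getD i 0)) = m.map some := by
      apply List.ext_getElem
      · simp
      · intro i h1 h2
        have hi : i < m.length := by simpa using h1
        simp only [List.getElem_map, List.getElem_range]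
        rw [List.getD_eq_getElem m 0 hi]
    simp only [List.foldl_nil, List.map_nil, this, pvSeq_map_some]
  | cons r R' ih =>
    intro m hlen
    have hr : r.length = m.length := hlen r (by simp)
    rw [List.foldl_cons]
    simp only [Option.bind_some]  -- acc = some m
    rw [pvMerge2_eq_seq]
    match hm : pvSeq (List.zipWith pvStepM m r) with
    | none =>
      -- some index conflicts: the corresponding column fold is none, so the RHS sequence is none
      have hnone : (none : Option Int) ∈ List.zipWith pvStepM m r := pvSeq_eq_none hm
      obtain ⟨i, hi, hstep⟩ : ∃ i, ∃ h : i < (List.zipWith pvStepM m r).length,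
          (List.zipWith pvStepM m r)[i] = none := List.mem_iff_getElem.mp hnone
      have hilen : i < m.length := by
        have := (List.length_zipWith ..).symm.trans_gt hi
        omega
      have hstep' : pvStepM (m.getD i 0) (r.getD i 0) = none := by
        have h1 : m.getD i 0 = m[i] := List.getD_eq_getElem m 0 hilen
        have h2 : r.getD i 0 = r[i] := List.getD_eq_getElem r 0 (by omega)
        rw [h1, h2]
        simpa [List.getElem_zipWith] using hstep
      have hfoldnone : ∀ cs : List (List Int),
          cs.foldl (fun acc row => acc.bind (fun mm => pvMerge2 mm row)) none = none := by
        intro cs; induction cs with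
        | nil => rfl
        | cons c' cs' ih' => rw [List.foldl_cons]; exact ih'
      rw [hfoldnone]
      symm
      apply pvSeq_none
      refine List.mem_map.mpr ⟨i, List.mem_range.mpr hilen, ?_⟩
      rw [List.map_cons, List.foldl_cons, pvStepA_some, hstep', pvStepA_none]
    | some m' =>
      have hz : List.zipWith pvStepM m r = m'.map some := pvSeq_eq_some hm
      have hlen' : m'.length = m.length := by
        have := congrArg List.length hz
        simp [List.length_zipWith, hr] at this
        omega
      have hstep' : ∀ i, i < m.length →
          pvStepM (m.getD i 0) (r.getD i 0) = some (m'.getD i 0) := by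
        intro i hi
        have h1 : m.getD i 0 = m[i] := List.getD_eq_getElem m 0 hi
        have h2 : r.getD i 0 = r[i] := List.getD_eq_getElem r 0 (by omega)
        have h3 : m'.getD i 0 = m'[i]'(by omega) := List.getD_eq_getElem m' 0 (by omega)
        have h4 : (List.zipWith pvStepM m r)[i]'(by simp [List.length_zipWith]; omega)
            = (m'.map some)[i]'(by simp; omega) := by simp only [hz]
        rw [h1, h2, h3]
        simpa [List.getElem_zipWith] using h4
      rw [ih m' (fun l hl => (hlen l (by simp [hl])).trans hlen'.symm), hlen']
      congr 1
      apply List.map_congr_left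
      intro i hi
      have hi' : i < m.length := List.mem_range.mp hi
      rw [List.map_cons, List.foldl_cons, pvStepA_some, hstep' i hi']

-- ===== VERDICT (by name: the statement is the Claim_ definition above) =====
theorem compute_compatible_dims_mapping_spec : Claim_equal_compute_compatible_dims_mapping := by
  intro L _ hpre
  unfold Spec_compute_compatible_dims_mapping
  cases L with
  | nil => rfl
  | cons l0 rest =>
    have hpre' : ∀ l ∈ l0 :: rest, l.length = l0.length := by
      simpa [Pre_compute_compatible_dims_mapping] using hpre
    have hA : compute_compatible_dims_mapping (l0 :: rest)
        = (pvSeq ((pvZipStar (l0 :: rest)).map compute_compatible_dim_mapping_port)).map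
            (fun vs => [] ++ vs) := by
      rw [show compute_compatible_dims_mapping (l0 :: rest)
          = (pvZipStar (l0 :: rest)).foldl
              (fun acc col =>
                match acc with
                | none => none
                | some r =>
                  match compute_compatible_dim_mapping_port col with
                  | none => none
                  | some v => some (r ++ [v]))
              (some []) from rfl, pvBuild_eq]
    rw [hA]
    have hB : compute_compatible_dims_mapping_alt (l0 :: rest)
        = (l0 :: rest).foldl (fun acc row => acc.bind (fun m => pvMerge2 m row))
            (some (List.replicate l0.length (-1))) := rfl
    rw [hB, pvRowFold _ _ (by
      intro r hrm; rw [List.length_replicate]; exact hpre' r hrm)]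
    have hmaps : (pvZipStar (l0 :: rest)).map compute_compatible_dim_mapping_port
        = (List.range (List.replicate l0.length (-1 : Int)).length).map
            (fun i => ((l0 :: rest).map (fun l => l.getD i 0)).foldl pvStepA
              (some ((List.replicate l0.length (-1 : Int)).getD i 0))) := by
      simp only [pvZipStar, List.map_map, List.length_replicate]
      apply List.map_congr_left
      intro i hi
      have hi' : i < l0.length := List.mem_range.mp hi
      have hrep : (List.replicate l0.length (-1 : Int)).getD i 0 = -1 := by
        rw [List.getD_eq_getElem _ 0 (by simpa using hi'), List.getElem_replicate]
      rw [hrep]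
      show compute_compatible_dim_mapping_port ((l0 :: rest).map (fun l => l.getD i 0)) = _
      rw [List.map_cons, pvHelper_eq]
    rw [hmaps]
    cases pvSeq _ <;> simp
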